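-- pv_equiv track=rewrite | github.com/manishkr/algorithms | Practice/T9Spelling/T9Spelling.py | CreateMaped
-- ===== SOURCE A (Python) =====
-- groupMap = {'2':('a', 'b', 'c'), '3':('d', 'e', 'f'), '4':('g', 'h', 'i'), '5':('j', 'k', 'l'),
--         '6':('m', 'n', 'o'), '7':('p', 'q', 'r', 's'), '8':('t', 'u', 'v'), '9':('w', 'x', 'y', 'z'), '0':(' '), '$':('$')}
--
-- charMap = {'a':'2', 'b':'22', 'c':'222', 'd':'3', 'e':'33', 'f':'333', 'g':'4', 'h':'44', 'i':'444', 'j':'5', 'k':'55', 'l':'555',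
--            'm':'6', 'n':'66', 'o':'666', 'p':'7', 'q':'77', 'r':'777', 's':'7777', 't':'8', 'u':'88', 'v':'888', 'w':'9',
--            'x':'99', 'y':'999', 'z':'9999', ' ':'0', '$':'$'}
--
-- def CreateMaped(chars):
--     lastChar = '$'
--     lst = []
--     for char in chars:
--         if char == lastChar:
--             lst.append(' ')
--
--         if char != '\n':
--             if groupMap[charMap[char][0]] == groupMap[charMap[lastChar][0]]:
--                 lst.append(' ')
--
--             lst.append(charMap[char])
--             lastChar = char
--
--     return ''.join(lst)
-- ===== SOURCE B (Python) =====
-- def _code(c):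
--     # T9 code computed arithmetically, no lookup table
--     if c == ' ':
--         return '0'
--     if c == '$':
--         return '$'
--     i = ord(c) - ord('a')
--     if i < 15:
--         d, n = 2 + i // 3, i % 3 + 1
--     elif i < 19:
--         d, n = 7, i - 14
--     elif i < 22:
--         d, n = 8, i - 18
--     else:
--         d, n = 9, i - 21
--     return str(d) * n
--
-- def _enc(prev, seg):
--     # encode seg given the code of the character preceding it; divide and conquer
--     if not seg:
--         return ''
--     if len(seg) == 1:
--         cur = _code(seg[0])
--         return ' ' * ((cur == prev) + (cur[0] == prev[0])) + cur
--     m = len(seg) // 2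
--     return _enc(prev, seg[:m]) + _enc(_code(seg[m - 1]), seg[m:])
--
-- def CreateMaped(chars):
--     cleaned = [c for c in chars if c != '\n']
--     return _enc('$', cleaned)
-- ===== Notes on version B (the rewrite author's own statement) =====
-- stated objective: alternative
-- what changed: B drops both lookup tables (each code is derived by closed-form ordinal arithmetic from ord(c)) and replaces A's single stateful loop by divide-and-conquer: the newline-filtered list is split in halves, each half encoded independently given the code of the character preceding it, and the halves concatenated.
import Mathlib
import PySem

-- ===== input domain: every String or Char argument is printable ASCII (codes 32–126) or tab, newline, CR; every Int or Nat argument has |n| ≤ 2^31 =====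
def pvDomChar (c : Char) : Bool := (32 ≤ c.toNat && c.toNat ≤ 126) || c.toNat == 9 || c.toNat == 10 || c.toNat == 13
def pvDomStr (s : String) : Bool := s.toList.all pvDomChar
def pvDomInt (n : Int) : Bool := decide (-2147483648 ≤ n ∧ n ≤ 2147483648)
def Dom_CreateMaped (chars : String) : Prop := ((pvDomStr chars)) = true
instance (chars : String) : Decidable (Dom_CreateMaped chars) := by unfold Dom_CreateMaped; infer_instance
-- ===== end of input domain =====

-- B computes each T9 code by closed-form ordinal arithmetic (no lookup tables) and encodes the
-- newline-filtered characters by divide-and-conquer on halves; objective: alternative algorithm.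


-- ===== PORT A =====
def charMapA : PySem.Dict Char String := PySem.Dict.ofList
  [('a',"2"),('b',"22"),('c',"222"),('d',"3"),('e',"33"),('f',"333"),('g',"4"),('h',"44"),('i',"444"),
   ('j',"5"),('k',"55"),('l',"555"),('m',"6"),('n',"66"),('o',"666"),('p',"7"),('q',"77"),('r',"777"),
   ('s',"7777"),('t',"8"),('u',"88"),('v',"888"),('w',"9"),('x',"99"),('y',"999"),('z',"9999"),
   (' ',"0"),('$',"$")]

-- Python's groupMap values (tuples of letters; two bare one-char strings); A only compares these values for equality.
def groupMapA : PySem.Dict Char (List String) := PySem.Dict.ofList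
  [('2',["a","b","c"]),('3',["d","e","f"]),('4',["g","h","i"]),('5',["j","k","l"]),
   ('6',["m","n","o"]),('7',["p","q","r","s"]),('8',["t","u","v"]),('9',["w","x","y","z"]),
   ('0',[" "]),('$',["$"])]

-- one iteration of A's for-loop; dict lookups via get?/getD (KeyError inputs are excluded by Pre_)
def stepA (st : Char × List String) (c : Char) : Char × List String :=
  let lst := if c == st.1 then st.2 ++ [" "] else st.2
  if c != '\n' then
    let code := (charMapA.get? c).getD ""
    let lastCode := (charMapA.get? st.1).getD ""
    let lst := if (groupMapA.get? (code.toList.headD ' ')).getD [] ==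
               (groupMapA.get? (lastCode.toList.headD ' ')).getD [] then lst ++ [" "] else lst
    (c, lst ++ [code])
  else (st.1, lst)

def CreateMaped (chars : String) : String :=
  String.join (chars.toList.foldl stepA ('$', [])).2

-- ===== PORT B =====
-- T9 code computed arithmetically, no lookup table (Source B's _code)
def codeB (c : Char) : String :=
  if c = ' ' then "0"
  else if c = '$' then "$"
  else
    let i := c.toNat - 'a'.toNat
    let p : Nat × Nat :=
      if i < 15 then (2 + i / 3, i % 3 + 1)
      else if i < 19 then (7, i - 14)
      else if i < 22 then (8, i - 18)
      else (9, i - 21)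
    String.mk (List.replicate p.2 (Char.ofNat (48 + p.1)))

-- ' ' * sep + cur (Source B's _piece)
def pieceB (prev cur : String) : String :=
  String.mk (List.replicate ((if cur == prev then 1 else 0) +
    (if cur.toList.headD ' ' == prev.toList.headD ' ' then 1 else 0)) ' ') ++ cur

-- divide-and-conquer encoder (Source B's _enc): prev is the code of the preceding character
def encB (prev : String) (seg : List Char) : String :=
  match seg with
  | [] => ""
  | [c] => pieceB prev (codeB c)
  | a :: b :: rest =>
    encB prev ((a :: b :: rest).take ((a :: b :: rest).length / 2)) ++
      encB (codeB ((PySem.List.pyGet? (a :: b :: rest)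
          (((a :: b :: rest).length / 2 : Nat) - 1)).getD '$'))
        ((a :: b :: rest).drop ((a :: b :: rest).length / 2))
termination_by seg.length
decreasing_by
  · simp [List.length_take]; omega
  · simp; omega

def CreateMaped_alt (chars : String) : String :=
  encB "$" (chars.toList.filter (fun c => c != '\n'))

-- ===== PRECONDITION & SPEC =====
def pvAlphabet : List Char :=
  ['a','b','c','d','e','f','g','h','i','j','k','l','m','n','o','p','q','r','s','t','u','v','w','x','y','z',' ','$']

-- A raises KeyError on any character outside charMap's keys other than the skipped '\n'.
def Pre_CreateMaped (chars : String) : Prop :=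
  (chars.toList.all fun c => c == '\n' || pvAlphabet.contains c) = true
instance (chars : String) : Decidable (Pre_CreateMaped chars) := by unfold Pre_CreateMaped; infer_instance
def pvWitness_CreateMaped : String := "hi there"

def Spec_CreateMaped (chars : String) (out : String) : Prop := out = CreateMaped_alt chars
instance (chars : String) (out : String) : Decidable (Spec_CreateMaped chars out) := by unfold Spec_CreateMaped; infer_instance

-- ===== CLAIM (what is proved, stated in full; the proofs are below) =====
def Claim_equal_CreateMaped : Prop := ∀ (chars : String), Dom_CreateMaped chars → Pre_CreateMaped chars → Spec_CreateMaped chars (CreateMaped chars)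

-- ===== LEMMAS AND PROOFS =====

-- the code A looks up for a character
def cdA (c : Char) : String := (charMapA.get? c).getD ""

-- sequential left-to-right encoder: the reference both ports are related to in the proofs
def goB (prev : String) : List Char → String
  | [] => ""
  | c :: rest => pieceB prev (codeB c) ++ goB (codeB c) rest

-- the strings A appends for one kept character c after previous character last
def pieceA (last c : Char) : List String :=
  (if c == last then [" "] else []) ++
  (if (groupMapA.get? (((charMapA.get? c).getD "").toList.headD ' ')).getD [] ==
      (groupMapA.get? (((charMapA.get? last).getD "").toList.headD ' ')).getD [] then [" "] else []) ++
  [(charMapA.get? c).getD ""]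

theorem stepA_keep (last : Char) (lst : List String) (c : Char) (h : c ≠ '\n') :
    stepA (last, lst) c = (c, lst ++ pieceA last c) := by
  simp [stepA, pieceA, h]
  split_ifs <;> simp

-- finite-table facts, as closed Bool computations (rfl-checked)

theorem nl_notin : (pvAlphabet.all fun l => '\n' != l) = true := rfl

-- B's arithmetic code coincides with A's table lookup on the alphabet
theorem code_agree : (pvAlphabet.all fun c => codeB c == cdA c) = true := rfl

-- charMap is injective on the alphabet: char equality ↔ code equality
theorem code_inj : (pvAlphabet.all fun last => pvAlphabet.all fun c =>
    (c == last) == (cdA c == cdA last)) = true := rfl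

-- A's groupMap-value comparison coincides with comparing the codes' first digits
theorem group_head : (pvAlphabet.all fun last => pvAlphabet.all fun c =>
    ((groupMapA.get? ((cdA c).toList.headD ' ')).getD [] ==
     (groupMapA.get? ((cdA last).toList.headD ' ')).getD []) ==
    ((cdA c).toList.headD ' ' == (cdA last).toList.headD ' ')) = true := rfl

theorem stepA_newline (last : Char) (lst : List String) (hl : last ∈ pvAlphabet) :
    stepA (last, lst) '\n' = (last, lst) := by
  have h : ('\n' != last) = true := List.all_eq_true.mp nl_notin last hl
  have h' : ('\n' == last) = false := by simpa using h
  simp [stepA, h']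

theorem foldl_sappend_eq (l : List String) : ∀ init : String,
    l.foldl (fun r s => r ++ s) init = init ++ l.foldl (fun r s => r ++ s) "" := by
  induction l with
  | nil => intro init; simp
  | cons x xs ih =>
    intro init
    rw [List.foldl_cons, ih (init ++ x), List.foldl_cons, ih ("" ++ x)]
    simp [String.append_assoc]

theorem join_append (a b : List String) :
    String.join (a ++ b) = String.join a ++ String.join b := by
  simp only [String.join, List.foldl_append]
  rw [foldl_sappend_eq b (List.foldl (fun r s => r ++ s) "" a)]

theorem spaces_join (b1 b2 : Bool) (code : String) :
    String.join ((if b1 then [" "] else []) ++ (if b2 then [" "] else []) ++ [code]) =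
    String.mk (List.replicate ((if b1 then 1 else 0) + (if b2 then 1 else 0)) ' ') ++ code := by
  cases b1 <;> cases b2 <;> simp [String.join] <;> rfl

-- per-pair agreement between A's appended pieces and B's separator+code string
theorem pair_eq (last : Char) (hl : last ∈ pvAlphabet) (c : Char) (hc : c ∈ pvAlphabet) :
    String.join (pieceA last c) = pieceB (cdA last) (codeB c) := by
  have hcode : codeB c = cdA c := by
    have := List.all_eq_true.mp code_agree c hc
    simpa using this
  have hinj : (c == last) = (cdA c == cdA last) := by
    have hiff : c = last ↔ cdA c = cdA last :=
      (by simpa using List.all_eq_true.mp code_inj last hl :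
        ∀ x ∈ pvAlphabet, x = last ↔ cdA x = cdA last) c hc
    rw [Bool.eq_iff_iff]; simpa using hiff
  have hgrp : ((groupMapA.get? ((cdA c).toList.headD ' ')).getD [] ==
      (groupMapA.get? ((cdA last).toList.headD ' ')).getD []) =
      ((cdA c).toList.headD ' ' == (cdA last).toList.headD ' ') := by
    have hiff := (by simpa using List.all_eq_true.mp group_head last hl :
      ∀ x ∈ pvAlphabet, ((groupMapA.get? ((cdA x).toList.headD ' ')).getD [] =
        (groupMapA.get? ((cdA last).toList.headD ' ')).getD []) ↔
        ((cdA x).toList.headD ' ' = (cdA last).toList.headD ' ')) c hc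
    rw [Bool.eq_iff_iff]; simpa using hiff
  have hA : (charMapA.get? c).getD "" = cdA c := rfl
  have hA' : (charMapA.get? last).getD "" = cdA last := rfl
  unfold pieceA pieceB
  rw [hA, hA', hcode, hinj, hgrp]
  exact spaces_join _ _ _

theorem main_invariant : ∀ (l : List Char), (∀ c ∈ l, c = '\n' ∨ c ∈ pvAlphabet) →
    ∀ last ∈ pvAlphabet, ∀ (A : List String),
    String.join ((l.foldl stepA (last, A)).2) =
    String.join A ++ goB (cdA last) (l.filter (fun c => c != '\n')) := by
  intro l
  induction l with
  | nil => intro _ last _ A; simp [goB]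
  | cons c l ih =>
    intro hmem last hlast A
    have hc := hmem c (by simp)
    by_cases hnl : c = '\n'
    · subst hnl
      rw [List.foldl_cons, stepA_newline last A hlast]
      have hfilter : ('\n' :: l).filter (fun c => c != '\n') = l.filter (fun c => c != '\n') := by
        simp
      rw [hfilter]
      exact ih (fun d hd => hmem d (by simp [hd])) last hlast A
    · have hcS : c ∈ pvAlphabet := by
        rcases hc with h | h
        · exact absurd h hnl
        · exact h
      rw [List.foldl_cons, stepA_keep last A c hnl]
      have hfilter : (c :: l).filter (fun c => c != '\n') = c :: l.filter (fun c => c != '\n') := by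
        simp [hnl]
      rw [hfilter]
      have hcode : cdA c = codeB c := by
        have h := List.all_eq_true.mp code_agree c hcS
        have : codeB c = cdA c := by simpa using h
        exact this.symm
      rw [ih (fun d hd => hmem d (by simp [hd])) c hcS (A ++ pieceA last c),
          join_append, pair_eq last hlast c hcS, goB, hcode]
      simp [String.append_assoc]

theorem mem_dollar : '$' ∈ pvAlphabet := by simp [pvAlphabet]

-- the code of the last character of s, or prev when s is empty
def lastCode (prev : String) (s : List Char) : String :=
  match s.getLast? with
  | none => prev
  | some c => codeB c

theorem goB_append (s : List Char) : ∀ (t : List Char) (p : String),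
    goB p (s ++ t) = goB p s ++ goB (lastCode p s) t := by
  induction s with
  | nil => intro t p; simp [goB, lastCode]
  | cons c s ih =>
    intro t p
    have hl : lastCode p (c :: s) = lastCode (codeB c) s := by
      cases s with
      | nil => simp [lastCode]
      | cons d s' =>
        simp only [lastCode, List.getLast?_cons_cons]
        cases h : (d :: s').getLast? with
        | none => simp [List.getLast?_eq_none_iff] at h
        | some x => rfl
    rw [List.cons_append]
    show pieceB p (codeB c) ++ goB (codeB c) (s ++ t) = _
    rw [ih t (codeB c), hl]
    show _ = (pieceB p (codeB c) ++ goB (codeB c) s) ++ goB (lastCode (codeB c) s) t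
    rw [String.append_assoc]

theorem encB_eq_goB_aux : ∀ (n : Nat) (seg : List Char), seg.length ≤ n →
    ∀ prev, encB prev seg = goB prev seg := by
  intro n
  induction n with
  | zero =>
    intro seg hlen prev
    have : seg = [] := List.eq_nil_of_length_eq_zero (Nat.le_zero.mp hlen)
    subst this; simp [encB, goB]
  | succ n ih =>
    intro seg hlen prev
    match seg with
    | [] => simp [encB, goB]
    | [c] => simp [encB, goB]
    | a :: b :: rest =>
      set L := a :: b :: rest with hL
      have hlen2 : 2 ≤ L.length := by simp [hL]
      have hm1 : 1 ≤ L.length / 2 := by omega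
      have hmlt : L.length / 2 < L.length := by omega
      rw [encB]
      set m := L.length / 2 with hm
      have htake : (L.take m).length = m := by simp; omega
      have hdrop : (L.drop m).length = L.length - m := by simp
      have hidx : (PySem.List.pyGet? L ((m : Int) - 1)) = L[m-1]? := by
        have : ((m : Int) - 1) = ((m - 1 : Nat) : Int) := by omega
        rw [this, PySem.List.pyGet?_natCast]
      have hget : L[m-1]? = some (L[m-1]'(by omega)) := List.getElem?_eq_getElem (by omega)
      have h1 : encB prev (L.take m) = goB prev (L.take m) :=
        ih (L.take m) (by omega) prev
      have h2 : encB (codeB ((PySem.List.pyGet? L ((m : Int) - 1)).getD '$')) (L.drop m) =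
          goB (codeB (L[m-1]'(by omega))) (L.drop m) := by
        rw [hidx, hget]
        exact ih (L.drop m) (by omega) _
      rw [h1, h2]
      have hlast : lastCode prev (L.take m) = codeB (L[m-1]'(by omega)) := by
        have hne : L.take m ≠ [] := by
          intro h; have := congrArg List.length h; simp [htake] at this; omega
        have : (L.take m).getLast? = (L.take m)[m-1]? := by
          rw [List.getLast?_eq_getElem?, htake]
        rw [lastCode, this, List.getElem?_take_of_lt (by omega), hget]
      rw [← hlast, ← goB_append, List.take_append_drop]

theorem encB_eq_goB (prev : String) (seg : List Char) : encB prev seg = goB prev seg :=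
  encB_eq_goB_aux seg.length seg (le_refl _) prev

-- ===== VERDICT =====
theorem CreateMaped_spec : Claim_equal_CreateMaped := by
  intro chars _ hpre
  unfold Spec_CreateMaped CreateMaped CreateMaped_alt
  have hmem : ∀ c ∈ chars.toList, c = '\n' ∨ c ∈ pvAlphabet := by
    intro c hc
    have := List.all_eq_true.mp hpre c hc
    rcases Bool.or_eq_true_iff.mp this with h | h
    · left; exact eq_of_beq h
    · right; exact List.contains_iff_mem.mp h
  rw [encB_eq_goB]
  have h := main_invariant chars.toList hmem '$' mem_dollar []
  have hdollar : cdA '$' = "$" := rfl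
  rw [hdollar] at h
  simpa using h
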